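-- pv_equiv track=rewrite | github.com/awesome-skills/recall | scripts/recall.py | deduplicate_slugs
-- ===== SOURCE A (Python) =====
-- def deduplicate_slugs(results):
--     """Return a mapping of session_id -> display_slug with suffixes for duplicates.
--
--     When multiple results share the same slug, append a short session_id suffix
--     (last 8 chars) to make them visually distinct.
--     """
--     slug_counts = {}
--     for row in results:
--         slug = row[4] or ""
--         slug_counts[slug] = slug_counts.get(slug, 0) + 1
--
--     display_slugs = {}
--     for row in results:
--         session_id, slug = row[0], row[4] or ""
--         if slug_counts.get(slug, 1) > 1:
--             suffix = session_id[-8:] if len(session_id) >= 8 else session_id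
--             display_slugs[session_id] = f"{slug}-{suffix}"
--         else:
--             display_slugs[session_id] = slug
--     return display_slugs
-- ===== SOURCE B (Python) =====
-- def deduplicate_slugs(results):
--     """Return a mapping of session_id -> display_slug with suffixes for duplicates."""
--     slugs = sorted(row[4] or "" for row in results)
--     dups = {a for a, b in zip(slugs, slugs[1:]) if a == b}
--     out = {}
--     for row in results:
--         sid, slug = row[0], row[4] or ""
--         out[sid] = f"{slug}-{sid[-8:]}" if slug in dups else slug
--     return out
-- ===== Notes on version B (the rewrite author's own statement) =====
-- stated objective: alternative
-- what changed: Replaces the counting dict with sort-then-adjacent-scan duplicate detection (a set of duplicated slugs), and uses the uniform slice sid[-8:] instead of a length-conditional suffix.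
import Mathlib
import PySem

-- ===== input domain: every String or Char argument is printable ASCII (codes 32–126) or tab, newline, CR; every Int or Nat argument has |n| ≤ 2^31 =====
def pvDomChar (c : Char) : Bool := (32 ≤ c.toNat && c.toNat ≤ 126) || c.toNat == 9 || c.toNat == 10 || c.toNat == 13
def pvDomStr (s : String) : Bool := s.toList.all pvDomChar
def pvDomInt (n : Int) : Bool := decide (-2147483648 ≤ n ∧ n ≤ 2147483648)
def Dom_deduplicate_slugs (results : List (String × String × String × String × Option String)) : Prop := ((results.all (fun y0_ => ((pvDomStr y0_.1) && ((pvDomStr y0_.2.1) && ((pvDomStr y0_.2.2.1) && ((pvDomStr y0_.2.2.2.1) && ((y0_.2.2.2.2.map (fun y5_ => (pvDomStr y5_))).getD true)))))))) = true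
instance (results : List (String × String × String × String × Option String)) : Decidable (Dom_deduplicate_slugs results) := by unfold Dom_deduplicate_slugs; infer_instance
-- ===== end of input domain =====

-- B replaces A's counting dict {slug: count} by sort-then-adjacent-scan duplicate detection
-- (a set of duplicated slugs) and uses the uniform Python slice sid[-8:] as the suffix
-- (alternative decomposition, not claimed faster).

-- row[4] or ""  (shared truthiness helper, used by both ports)
def pvSlugOf (o : Option String) : String :=
  match o with
  | none => ""
  | some s => if s == "" then "" else s

-- ===== PORT A =====
def deduplicate_slugs (results : List (String × String × String × String × Option String)) : List (String × String) :=
  -- slug_counts = {}; for row in results: slug_counts[slug] = slug_counts.get(slug, 0) + 1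
  let slug_counts : PySem.Dict String Int :=
    results.foldl (fun d row =>
      let slug := pvSlugOf row.2.2.2.2
      d.insert slug (d.getD slug 0 + 1)) PySem.Dict.empty
  -- display_slugs = {}; second loop
  let display_slugs : PySem.Dict String String :=
    results.foldl (fun d row =>
      let session_id := row.1
      let slug := pvSlugOf row.2.2.2.2
      if slug_counts.getD slug 1 > 1 then
        let suffix := if 8 ≤ PySem.Str.len session_id then PySem.Str.slice session_id (some (-8)) none else session_id
        d.insert session_id (slug ++ "-" ++ suffix)
      else
        d.insert session_id slug) PySem.Dict.empty
  display_slugs.items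

-- ===== PORT B =====
-- {a for a, b in zip(slugs, slugs[1:]) if a == b} — the list fed to set(...), slugs[1:] as a slice
def pvAdj (l : List String) : List String :=
  ((l.zip (PySem.List.slice l (some 1) none)).filter (fun p => p.1 == p.2)).map (·.1)

def deduplicate_slugs_alt (results : List (String × String × String × String × Option String)) : List (String × String) :=
  -- slugs = sorted(row[4] or "" for row in results)
  let slugs := PySem.List.sorted (results.map (fun row => pvSlugOf row.2.2.2.2)) (fun x => x) false
  -- dups = {a for a, b in zip(slugs, slugs[1:]) if a == b}
  let dups : PySem.Set String :=
    PySem.Set.ofList (pvAdj slugs)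
  -- out = {}; for row in results: out[sid] = f"{slug}-{sid[-8:]}" if slug in dups else slug
  let out : PySem.Dict String String :=
    results.foldl (fun d row =>
      let sid := row.1
      let slug := pvSlugOf row.2.2.2.2
      d.insert sid (if dups.contains slug then slug ++ "-" ++ PySem.Str.slice sid (some (-8)) none else slug)) PySem.Dict.empty
  out.items

-- ===== PRECONDITION & SPEC =====
def Spec_deduplicate_slugs (results : List (String × String × String × String × Option String)) (out : List (String × String)) : Prop := out = deduplicate_slugs_alt results
instance (results : List (String × String × String × String × Option String)) (out : List (String × String)) : Decidable (Spec_deduplicate_slugs results out) := by unfold Spec_deduplicate_slugs; infer_instance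

-- ===== CLAIM (what is proved, stated in full; the proofs are below) =====
def Claim_equal_deduplicate_slugs : Prop := ∀ (results : List (String × String × String × String × Option String)), Dom_deduplicate_slugs results → Spec_deduplicate_slugs results (deduplicate_slugs results)

-- ===== LEMMAS AND PROOFS =====

-- the adjacent-duplicate scan of B's sorted list names exactly the values occurring ≥ 2 times
theorem pvAdjT_mem_iff (l : List String) (hs : l.Pairwise (· ≤ ·)) (a : String) :
    a ∈ ((l.zip l.tail).filter (fun p => p.1 == p.2)).map (·.1) ↔ 2 ≤ l.count a := by
  induction l with
  | nil => simp
  | cons x t ih =>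
    cases t with
    | nil =>
      simp only [List.tail_cons, List.zip_nil_right, List.filter_nil, List.map_nil,
        List.not_mem_nil, false_iff, not_le, List.count_cons, List.count_nil]
      split <;> omega
    | cons y t' =>
      have hxy : x ≤ y := (List.pairwise_cons.mp hs).1 y (by simp)
      have hxall : ∀ z ∈ y :: t', x ≤ z := (List.pairwise_cons.mp hs).1
      have hs' : (y :: t').Pairwise (· ≤ ·) := (List.pairwise_cons.mp hs).2
      have ih' := ih hs'
      have hadj : (((x :: y :: t').zip (x :: y :: t').tail).filter (fun p => p.1 == p.2)).map (·.1)
          = (if x == y then [x] else []) ++ (((y :: t').zip (y :: t').tail).filter (fun p => p.1 == p.2)).map (·.1) := by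
        simp only [List.tail_cons, List.zip_cons_cons, List.filter_cons]
        by_cases h : x = y <;> simp [h]
      rw [hadj]
      constructor
      · intro hmem
        rcases List.mem_append.mp hmem with h1 | h2
        · by_cases hxeqy : x = y
          · simp only [hxeqy, beq_self_eq_true, if_true, List.mem_singleton] at h1
            subst h1
            rw [hxeqy, List.count_cons_self, List.count_cons_self]
            omega
          · simp [hxeqy] at h1
        · have := ih'.mp h2
          rw [List.count_cons]
          omega
      · intro hcnt
        by_cases h2 : 2 ≤ (y :: t').count a
        · exact List.mem_append.mpr (Or.inr (ih'.mpr h2))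
        · -- count a (y::t') ≤ 1, so x = a and a occurs once in y::t'
          have hxa : x = a := by
            by_contra hne
            have hx : List.count a (x :: y :: t') = List.count a (y :: t') := by
              rw [List.count_cons]
              simp [hne]
            rw [hx] at hcnt
            exact h2 hcnt
          subst hxa
          have hone : 1 ≤ (y :: t').count x := by
            rw [List.count_cons_self] at hcnt
            omega
          have hmem : x ∈ y :: t' := List.count_pos_iff.mp (by omega)
          have hyx : x = y := by
            rcases List.mem_cons.mp hmem with h | h
            · exact h
            · have hyz : y ≤ x := (List.pairwise_cons.mp hs').1 x h
              exact le_antisymm hxy hyz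
          apply List.mem_append.mpr (Or.inl _)
          simp [hyx]

theorem pvAdj_mem_iff (l : List String) (hs : l.Pairwise (· ≤ ·)) (a : String) :
    a ∈ pvAdj l ↔ 2 ≤ l.count a := by
  unfold pvAdj
  rw [PySem.List.slice_from_one]
  exact pvAdjT_mem_iff l hs a

-- a Dict lookup at a present key ignores the default
theorem pvGetD_default_irrel {κ ν : Type} [BEq κ] (d : PySem.Dict κ ν) (k : κ)
    (h : d.contains k = true) (d0 d1 : ν) : d.getD k d0 = d.getD k d1 := by
  rw [PySem.Dict.getD_eq_get?_getD, PySem.Dict.getD_eq_get?_getD]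
  rw [PySem.Dict.contains_eq_isSome_get?] at h
  cases hg : d.get? k with
  | none => rw [hg] at h; simp at h
  | some v => simp

-- A's first loop is the counting loop over the slug list
theorem pvCounts_getD (results : List (String × String × String × String × Option String))
    (row : String × String × String × String × Option String) (hrow : row ∈ results) :
    (results.foldl (fun d r =>
      d.insert (pvSlugOf r.2.2.2.2) (d.getD (pvSlugOf r.2.2.2.2) 0 + 1)) PySem.Dict.empty).getD (pvSlugOf row.2.2.2.2) 1
    = ((results.map (fun r => pvSlugOf r.2.2.2.2)).count (pvSlugOf row.2.2.2.2) : Int) := by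
  have hfold : (results.foldl (fun d r =>
      d.insert (pvSlugOf r.2.2.2.2) (d.getD (pvSlugOf r.2.2.2.2) 0 + 1)) (PySem.Dict.empty : PySem.Dict String Int))
      = (results.map (fun r => pvSlugOf r.2.2.2.2)).foldl (fun d x => d.insert x (d.getD x 0 + 1)) PySem.Dict.empty := by
    rw [List.foldl_map]
  rw [hfold]
  set L := results.map (fun r => pvSlugOf r.2.2.2.2) with hL
  set a := pvSlugOf row.2.2.2.2 with ha
  have hmem : a ∈ L := by
    rw [hL, ha]; exact List.mem_map.mpr ⟨row, hrow, rfl⟩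
  have hcont : (L.foldl (fun d x => d.insert x (d.getD x 0 + 1)) (PySem.Dict.empty : PySem.Dict String Int)).contains a = true := by
    rw [PySem.Dict.contains_iff_mem_keys, PySem.Dict.keys_foldl_insert]
    simpa [PySem.Dict.keys_empty, PySem.Set.update, PySem.Set.ofList_eq_foldl] using
      (PySem.Set.mem_ofList L a).mpr hmem
  refine Eq.trans (pvGetD_default_irrel _ _ hcont 1 0) ?_
  refine Eq.trans (PySem.Dict.getD_foldl_insert_add_one L PySem.Dict.empty a) ?_
  simp [PySem.Dict.getD_empty]

-- B's dups set holds exactly the slugs occurring at least twice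
theorem pvDups_contains (results : List (String × String × String × String × Option String)) (a : String) :
    (PySem.Set.ofList (pvAdj (PySem.List.sorted (results.map (fun r => pvSlugOf r.2.2.2.2)) (fun x => x) false))).contains a = true
    ↔ 2 ≤ (results.map (fun r => pvSlugOf r.2.2.2.2)).count a := by
  set L := results.map (fun r => pvSlugOf r.2.2.2.2) with hL
  set S := PySem.List.sorted L (fun x => x) false with hS
  rw [PySem.Set.contains_iff, PySem.Set.mem_ofList]
  rw [pvAdj_mem_iff S (by simpa using PySem.List.sorted_pairwise L (fun x => x)) a]
  have hperm : S.Perm L := PySem.List.sorted_perm L (fun x => x) false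
  rw [hperm.count_eq]

-- sid[-8:] is sid itself on strings shorter than 8 characters
theorem pvSlice_short (s : String) (h : s.toList.length < 8) :
    PySem.Str.slice s (some (-8)) none = s := by
  rw [← String.toList_inj, PySem.Str.toList_slice, PySem.Chars.slice_eq_listSlice]
  rw [PySem.List.slice_from_neg_ofNat s.toList 8 (by omega)]
  have : s.toList.length - 8 = 0 := by omega
  rw [this, List.drop_zero]

-- ===== VERDICT (by name: the statement is the Claim_ definition above) =====
theorem deduplicate_slugs_spec : Claim_equal_deduplicate_slugs := by
  intro results _
  unfold Spec_deduplicate_slugs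
  simp only [deduplicate_slugs, deduplicate_slugs_alt]
  congr 1
  apply PySem.List.foldl_congr_mem
  intro d row hrow
  have hcount := pvCounts_getD results row hrow
  have hdups := pvDups_contains results (pvSlugOf row.2.2.2.2)
  rw [hcount]
  by_cases hc : 2 ≤ (results.map (fun r => pvSlugOf r.2.2.2.2)).count (pvSlugOf row.2.2.2.2)
  · have hgt : ((results.map (fun r => pvSlugOf r.2.2.2.2)).count (pvSlugOf row.2.2.2.2) : Int) > 1 := by
      exact_mod_cast hc
    rw [if_pos hgt]
    rw [if_pos (hdups.mpr hc)]
    congr 1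
    by_cases hlen : 8 ≤ PySem.Str.len row.1
    · rw [if_pos hlen]
    · rw [if_neg hlen]
      rw [pvSlice_short row.1 (by
        have := PySem.Str.len_eq row.1
        omega)]
  · have hle : ¬ (((results.map (fun r => pvSlugOf r.2.2.2.2)).count (pvSlugOf row.2.2.2.2) : Int) > 1) := by
      omega
    rw [if_neg hle]
    rw [if_neg (by
      intro hcontains
      exact hc (hdups.mp hcontains))]
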